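-- pv_equiv track=rewrite | github.com/Diinal/stepik_scripts | naturalterms.py | get_natural_terms
-- ===== SOURCE A (Python) =====
-- def get_natural_terms(n):
--     result = []
--     sum_result = 0
--     if n <= 2:
--         return [n]
--
--     i = 1
--     while sum_result < n:
--         if sum_result < n:
--             if sum_result + i <= n:
--                 result.append(i)
--                 sum_result += i
--             else:
--                 sum_result = sum_result -  result[-1] + i
--                 result[-1] = i
--         i += 1
--     return  result
-- ===== SOURCE B (Python) =====
-- def get_natural_terms(n):
--     if n <= 2:
--         return [n]
--     # largest k with k*(k+1)//2 <= n, found by scanning triangular numbers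
--     k = 1
--     while (k + 1) * (k + 2) // 2 <= n:
--         k += 1
--     r = n - k * (k + 1) // 2
--     return list(range(1, k)) + [k + r]
-- ===== Notes on version B (the rewrite author's own statement) =====
-- stated objective: simpler
-- what changed: Replaces the greedy build-then-repair loop over a growing list by finding the largest k with k(k+1)/2 <= n via a scalar scan of triangular numbers and emitting [1..k-1, k+r] directly.
import Mathlib
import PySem

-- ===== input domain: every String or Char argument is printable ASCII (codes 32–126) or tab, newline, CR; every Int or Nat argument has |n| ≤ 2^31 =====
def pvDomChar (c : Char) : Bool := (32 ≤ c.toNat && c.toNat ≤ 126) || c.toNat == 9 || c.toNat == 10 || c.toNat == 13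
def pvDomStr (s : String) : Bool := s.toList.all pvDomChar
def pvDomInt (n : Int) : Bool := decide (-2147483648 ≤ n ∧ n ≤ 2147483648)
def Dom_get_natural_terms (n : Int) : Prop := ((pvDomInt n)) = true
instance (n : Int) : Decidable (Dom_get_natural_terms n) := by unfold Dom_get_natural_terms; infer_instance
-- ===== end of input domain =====

-- B replaces A's greedy build-then-repair loop over a growing list by a scalar scan for the
-- largest k with k(k+1)/2 ≤ n, emitting [1..k-1, k+r] directly (objective: simpler).

-- ===== PORT A =====
-- A's while loop; the inner `if sum_result < n` duplicates the loop guard and is ported once.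
-- `result[-1]` is ported with getLast?/getD and dropLast (the list is never empty when that
-- branch runs, since the first iteration always appends); the fuel bounds the iteration count
-- and is proved sufficient below (sum_result strictly increases on reachable states).
def loopA (n : Int) : Nat → List Int → Int → Int → List Int
  | 0, result, _, _ => result
  | fuel + 1, result, sum_result, i =>
    if sum_result < n then
      if sum_result + i ≤ n then
        loopA n fuel (result ++ [i]) (sum_result + i) (i + 1)
      else
        loopA n fuel (result.dropLast ++ [i]) (sum_result - (result.getLast?.getD 0) + i) (i + 1)
    else result

def get_natural_terms (n : Int) : List Int :=
  if n ≤ 2 then [n]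
  else loopA n (n.toNat + 2) [] 0 1

-- ===== PORT B =====
-- `while (k+1)*(k+2)//2 <= n: k += 1`; k starts at 1 and only increments, kept as Nat
-- (Python's // on these nonnegative ints is exactly Nat division).
def kLoop (n : Int) : Nat → Nat → Nat
  | 0, k => k
  | fuel + 1, k =>
    if (((k + 1) * (k + 2) / 2 : Nat) : Int) ≤ n then kLoop n fuel (k + 1) else k

def get_natural_terms_alt (n : Int) : List Int :=
  if n ≤ 2 then [n]
  else
    let k : Int := (kLoop n (n.toNat + 1) 1 : Nat)
    let r : Int := n - ((kLoop n (n.toNat + 1) 1 * (kLoop n (n.toNat + 1) 1 + 1) / 2 : Nat) : Int)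
    PySem.List.pyRange 1 k 1 ++ [k + r]

-- ===== PRECONDITION & SPEC =====
def Spec_get_natural_terms (n : Int) (out : List Int) : Prop := out = get_natural_terms_alt n
instance (n : Int) (out : List Int) : Decidable (Spec_get_natural_terms n out) := by unfold Spec_get_natural_terms; infer_instance

-- ===== CLAIM (what is proved, stated in full; the proofs are below) =====
def Claim_equal_get_natural_terms : Prop := ∀ (n : Int), Dom_get_natural_terms n → Spec_get_natural_terms n (get_natural_terms n)

-- ===== LEMMAS AND PROOFS =====

/-- Triangular numbers, as Int. -/
def triInt : Nat → Int
  | 0 => 0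
  | k + 1 => triInt k + (k + 1)

/-- The list [1, 2, …, m] of Ints. -/
def intRange (m : Nat) : List Int := PySem.List.pyRange 1 ((m : Int) + 1) 1

lemma intRange_zero : intRange 0 = [] := by
  simp [intRange, PySem.List.pyRange_one_eq_nil]

lemma intRange_succ (m : Nat) : intRange (m + 1) = intRange m ++ [((m : Int) + 1)] := by
  have h := PySem.List.pyRange_one_succ_right (a := 1) (b := (m : Int) + 1) (by omega)
  simpa [intRange] using h

lemma intRange_split (K : Nat) (hK : 1 ≤ K) : intRange K = intRange (K - 1) ++ [(K : Int)] := by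
  conv_lhs => rw [show K = (K - 1) + 1 by omega]
  rw [intRange_succ]
  have : ((K - 1 : Nat) : Int) + 1 = (K : Int) := by omega
  rw [this]

lemma triInt_succ (k : Nat) : triInt (k + 1) = triInt k + ((k : Int) + 1) := by
  simp only [triInt]

lemma triInt_nat_div (k : Nat) : ((k * (k + 1) / 2 : Nat) : Int) = triInt k := by
  induction k with
  | zero => simp [triInt]
  | succ k ih =>
    have h2 : (k + 1) * ((k + 1) + 1) / 2 = k * (k + 1) / 2 + (k + 1) := by
      have hd : 2 ∣ k * (k + 1) := (Nat.even_mul_succ_self k).two_dvd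
      have he : (k + 1) * ((k + 1) + 1) = k * (k + 1) + 2 * (k + 1) := by ring
      omega
    rw [h2, Nat.cast_add, ih, triInt_succ]
    push_cast
    ring

lemma triInt_ge (k : Nat) : (k : Int) ≤ triInt k := by
  induction k with
  | zero => simp [triInt]
  | succ k ih =>
    rw [triInt_succ]
    push_cast
    omega

lemma triInt_le_succ (k : Nat) : triInt k ≤ triInt (k + 1) := by
  rw [triInt_succ]
  have : (0 : Int) ≤ (k : Int) := by positivity
  omega

lemma triInt_mono {a b : Nat} (h : a ≤ b) : triInt a ≤ triInt b := by
  induction h with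
  | refl => exact le_rfl
  | step h ih => exact le_trans ih (triInt_le_succ _)

lemma kLoop_ge (n : Int) (fuel : Nat) : ∀ k, k ≤ kLoop n fuel k := by
  induction fuel with
  | zero => intro k; simp [kLoop]
  | succ fuel ih =>
    intro k
    rw [kLoop]
    split
    · exact le_trans (by omega) (ih (k + 1))
    · exact le_rfl

lemma kLoop_le (n : Int) (fuel : Nat) :
    ∀ k, triInt k ≤ n → triInt (kLoop n fuel k) ≤ n := by
  induction fuel with
  | zero => intro k hk; simpa [kLoop] using hk
  | succ fuel ih =>
    intro k hk
    rw [kLoop]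
    split
    · rename_i h
      refine ih (k + 1) ?_
      rw [← triInt_nat_div]
      have he : (k + 1) * ((k + 1) + 1) = (k + 1) * (k + 2) := by ring
      rw [he]
      exact h
    · exact hk

lemma kLoop_lt (n : Int) (fuel : Nat) :
    ∀ k, triInt k ≤ n → n < (k : Int) + fuel → n < triInt (kLoop n fuel k + 1) := by
  induction fuel with
  | zero =>
    intro k hk hf
    have := triInt_le_succ k
    have := triInt_ge k
    simp only [kLoop]
    push_cast at hf
    omega
  | succ fuel ih =>
    intro k hk hf
    rw [kLoop]
    split
    · rename_i h
      refine ih (k + 1) ?_ (by push_cast at hf ⊢; omega)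
      rw [← triInt_nat_div]
      have he : (k + 1) * ((k + 1) + 1) = (k + 1) * (k + 2) := by ring
      rw [he]
      exact h
    · rename_i h
      push_neg at h
      rw [← triInt_nat_div]
      have he : (k + 1) * ((k + 1) + 1) = (k + 1) * (k + 2) := by ring
      rw [he]
      exact h

/-- Phase 2 of A's loop: once the last element is being bumped, it is bumped by 1 per
iteration until the sum reaches n. -/
lemma phase2 (n : Int) (K : Nat) (hK : 1 ≤ K) (hlt : n < triInt (K + 1)) :
    ∀ (fuel t : Nat), 1 ≤ t → (t : Int) ≤ n - triInt K → (n - triInt K).toNat - t < fuel →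
    loopA n fuel (intRange (K - 1) ++ [(K : Int) + t]) (triInt K + t) ((K : Int) + 1 + t)
      = intRange (K - 1) ++ [(K : Int) + (n - triInt K)] := by
  intro fuel
  induction fuel with
  | zero => intro t _ _ hf; omega
  | succ fuel ih =>
    intro t ht htr hf
    rcases eq_or_lt_of_le htr with heq | hlt'
    · -- t = r : guard fails, return
      rw [loopA]
      rw [if_neg (by omega), ← heq]
    · -- t < r : replace branch
      have hTK1 : triInt (K + 1) = triInt K + ((K : Int) + 1) := triInt_succ K
      rw [loopA]
      rw [if_pos (by omega)]
      rw [if_neg (by push_cast; omega)]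
      have hlast : ((intRange (K - 1) ++ [(K : Int) + t]).getLast?.getD 0) = (K : Int) + t := by
        simp
      have hdrop : (intRange (K - 1) ++ [(K : Int) + t]).dropLast = intRange (K - 1) := by
        simp
      rw [hlast, hdrop]
      have h1 : triInt K + t - ((K : Int) + t) + ((K : Int) + 1 + t) = triInt K + (t + 1) := by ring
      have h2 : (K : Int) + 1 + t + 1 = (K : Int) + 1 + ((t + 1 : Nat) : Int) := by push_cast; ring
      rw [h1, h2]
      have h3 : ((K : Int) + 1 + t) = (K : Int) + ((t + 1 : Nat) : Int) := by push_cast; ring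
      rw [show (intRange (K - 1) ++ [(K : Int) + 1 + t]) = (intRange (K - 1) ++ [(K : Int) + ((t + 1 : Nat) : Int)]) by rw [← h3]]
      have h4 : (triInt K + (t + 1) : Int) = triInt K + ((t + 1 : Nat) : Int) := by push_cast; ring
      rw [h4]
      exact ih (t + 1) (by omega) (by push_cast; omega) (by omega)

/-- Phase 1 of A's loop: consecutive integers are appended while the running sum stays ≤ n. -/
lemma phase1 (n : Int) (K : Nat) (hK : 1 ≤ K) (hle : triInt K ≤ n) (hlt : n < triInt (K + 1)) :
    ∀ (fuel j : Nat), 1 ≤ j → j ≤ K + 1 → (K + 1 - j) + (n - triInt K).toNat + 1 ≤ fuel →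
    loopA n fuel (intRange (j - 1)) (triInt (j - 1)) (j : Int)
      = intRange (K - 1) ++ [(K : Int) + (n - triInt K)] := by
  intro fuel
  induction fuel with
  | zero => intro j _ _ hf; omega
  | succ fuel ih =>
    intro j hj1 hjK hf
    have hTK1 : triInt (K + 1) = triInt K + ((K : Int) + 1) := triInt_succ K
    rcases Nat.lt_or_ge j (K + 1) with hcase | hcase
    · -- j ≤ K : append branch
      have hjm : j - 1 + 1 = j := by omega
      have hstep : triInt (j - 1) + (j : Int) = triInt j := by
        conv_rhs => rw [← hjm]
        rw [triInt_succ]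
        have : ((j - 1 : Nat) : Int) + 1 = (j : Int) := by omega
        rw [this]
      have hTj : triInt j ≤ triInt K := triInt_mono (by omega)
      have hTjm : triInt (j - 1) + (j : Int) ≤ triInt K := by rw [hstep]; exact hTj
      have hTjlt : triInt (j - 1) < triInt K := by
        have h0 : (0 : Int) < (j : Int) := by exact_mod_cast Nat.pos_of_ne_zero (by omega)
        omega
      rw [loopA]
      rw [if_pos (by omega)]
      rw [if_pos (by omega)]
      have hres : intRange (j - 1) ++ [(j : Int)] = intRange j := by
        conv_rhs => rw [← hjm]
        rw [intRange_succ]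
        have : ((j - 1 : Nat) : Int) + 1 = (j : Int) := by omega
        rw [this]
      rw [hres, hstep]
      have hcast : (j : Int) + 1 = ((j + 1 : Nat) : Int) := by push_cast; ring
      rw [hcast]
      have := ih (j + 1) (by omega) (by omega) (by omega)
      simpa using this
    · -- j = K + 1
      have hjK1 : j = K + 1 := by omega
      subst hjK1
      simp only [Nat.add_sub_cancel]
      rcases eq_or_lt_of_le hle with heq | hlt2
      · -- triInt K = n : guard fails immediately
        rw [loopA]
        rw [if_neg (by omega)]
        rw [← heq]
        simp only [sub_self, add_zero]
        exact intRange_split K hK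
      · -- triInt K < n : one replace step then phase 2
        rw [loopA]
        rw [if_pos hlt2]
        rw [if_neg (by push_cast; omega)]
        rw [intRange_split K hK]
        have hlast : ((intRange (K - 1) ++ [(K : Int)]).getLast?.getD 0) = (K : Int) := by
          simp
        have hdrop : (intRange (K - 1) ++ [(K : Int)]).dropLast = intRange (K - 1) := by
          simp
        rw [hlast, hdrop]
        have h1 : triInt K - (K : Int) + ((K + 1 : Nat) : Int) = triInt K + ((1 : Nat) : Int) := by
          push_cast; ring
        have h2 : ((K + 1 : Nat) : Int) + 1 = (K : Int) + 1 + ((1 : Nat) : Int) := by push_cast; ring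
        have h3 : ((K + 1 : Nat) : Int) = (K : Int) + ((1 : Nat) : Int) := by push_cast; ring
        rw [h1, h2, h3]
        exact phase2 n K hK hlt fuel 1 le_rfl (by push_cast; omega) (by omega)

-- ===== VERDICT (by name: the statement is the Claim_ definition above) =====
theorem get_natural_terms_spec : Claim_equal_get_natural_terms := by
  intro n _
  unfold Spec_get_natural_terms get_natural_terms get_natural_terms_alt
  by_cases h : n ≤ 2
  · simp [h]
  · rw [if_neg h, if_neg h]
    push_neg at h
    set K := kLoop n (n.toNat + 1) 1 with hKdef
    have hK1 : 1 ≤ K := kLoop_ge n (n.toNat + 1) 1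
    have hle : triInt K ≤ n := kLoop_le n (n.toNat + 1) 1 (by simp [triInt]; omega)
    have hlt : n < triInt (K + 1) := kLoop_lt n (n.toNat + 1) 1 (by simp [triInt]; omega) (by push_cast; omega)
    have hinit := phase1 n K hK1 hle hlt (n.toNat + 2) 1 le_rfl (by omega)
      (by
        have h1 : (K : Int) + (n - triInt K) ≤ n := by
          have := triInt_ge K; omega
        have h2 : (0 : Int) ≤ (K : Int) := by positivity
        omega)
    have hBody : (PySem.List.pyRange 1 ((K : Nat) : Int) 1
          ++ [((K : Nat) : Int) + (n - ((K * (K + 1) / 2 : Nat) : Int))])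
        = intRange (K - 1) ++ [(K : Int) + (n - triInt K)] := by
      rw [triInt_nat_div]
      have : ((K : Nat) : Int) = ((K - 1 : Nat) : Int) + 1 := by omega
      rw [show PySem.List.pyRange 1 ((K : Nat) : Int) 1 = intRange (K - 1) by rw [intRange]; rw [this]]
    have e0 : ([] : List Int) = intRange 0 := intRange_zero.symm
    have e1 : (0 : Int) = triInt 0 := rfl
    have e2 : loopA n (n.toNat + 2) (intRange 0) (triInt 0) ((1 : Nat) : Int)
        = loopA n (n.toNat + 2) [] 0 1 := by
      rw [← e0, ← e1]
      norm_num
    rw [← e2, hinit, ← hBody]
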